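-- pv_equiv track=rewrite | github.com/Kurt-Liuhf/absa-svm | dataset.py | direction_dependent
-- ===== SOURCE A (Python) =====
-- def direction_dependent(temp_dict, word, n):
--     selected_words = []
--     if word not in temp_dict.keys():
--         return []
--     else:
--         tmp_list = temp_dict[word]
--         selected_words.extend(tmp_list)
--         if n > 1:
--             for w in tmp_list:
--                 selected_words.extend(direction_dependent(temp_dict, w, n - 1))
--
--     return selected_words
-- ===== SOURCE B (Python) =====
-- def direction_dependent(temp_dict, word, n):
--     result = []
--     stack = [(word, n)]
--     while stack:
--         w, d = stack.pop()
--         if w not in temp_dict: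
--             continue
--         children = temp_dict[w]
--         result.extend(children)
--         if d > 1:
--             for c in reversed(children):
--                 stack.append((c, d - 1))
--     return result
-- ===== Notes on version B (the rewrite author's own statement) =====
-- stated objective: alternative
-- what changed: Replaced the recursive descent by an iterative depth-first traversal over an explicit stack of (word, remaining_depth) pairs, emitting each node's dependent list when popped and pushing its children reversed so they are visited in the original left-to-right order.
import Mathlib
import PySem

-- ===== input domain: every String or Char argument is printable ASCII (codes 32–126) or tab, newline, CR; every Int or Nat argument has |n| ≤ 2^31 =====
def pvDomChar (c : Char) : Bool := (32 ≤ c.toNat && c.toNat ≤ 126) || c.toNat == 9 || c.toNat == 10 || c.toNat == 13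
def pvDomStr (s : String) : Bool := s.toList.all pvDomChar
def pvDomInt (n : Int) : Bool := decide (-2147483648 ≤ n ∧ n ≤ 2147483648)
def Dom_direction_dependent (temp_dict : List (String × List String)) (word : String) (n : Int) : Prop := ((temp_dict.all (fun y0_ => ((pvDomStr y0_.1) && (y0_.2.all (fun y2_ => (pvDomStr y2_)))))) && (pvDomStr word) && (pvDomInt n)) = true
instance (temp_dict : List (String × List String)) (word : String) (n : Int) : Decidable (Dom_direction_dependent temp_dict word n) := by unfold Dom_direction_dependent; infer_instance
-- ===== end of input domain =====

-- B replaces A's recursion by an iterative depth-first traversal over an explicit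
-- stack of (word, remaining_depth) pairs (objective: alternative, same cost).

-- ===== PORT A =====
-- Literal transliteration of A: the `for w in tmp_list: selected_words.extend(...)`
-- loop becomes the mutually recursive loop `ddA_loop` over the same accumulator.
mutual
def direction_dependent (temp_dict : List (String × List String)) (word : String) (n : Int) : List String :=
  match PySem.Dict.get? ⟨temp_dict⟩ word with
  | none => []                                  -- `if word not in temp_dict.keys(): return []`
  | some tmp_list =>
      -- selected_words.extend(tmp_list)
      if hn : 1 < n then ddA_loop temp_dict (n - 1) tmp_list tmp_list
      else tmp_list
termination_by (n.toNat, 0)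
decreasing_by apply Prod.Lex.left; omega

def ddA_loop (temp_dict : List (String × List String)) (m : Int) (ws : List String) (selected_words : List String) : List String :=
  match ws with
  | [] => selected_words
  | w :: ws' => ddA_loop temp_dict m ws' (selected_words ++ direction_dependent temp_dict w m)
termination_by (m.toNat, ws.length)
decreasing_by
  · apply Prod.Lex.right; simp
  · apply Prod.Lex.right; simp
end

-- ===== PORT B =====
-- Total weight of all dependent lists in the dict; used only as a termination measure.
def pvM (temp_dict : List (String × List String)) : Nat :=
  (temp_dict.map fun p => p.2.length).sum

theorem pvM_get? (temp_dict : List (String × List String)) (w : String) (c : List String)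
    (h : PySem.Dict.get? ⟨temp_dict⟩ w = some c) : c.length ≤ pvM temp_dict := by
  induction temp_dict with
  | nil => simp [PySem.Dict.get?] at h
  | cons p rest ih =>
      rw [PySem.Dict.get?_mk_cons] at h
      by_cases hp : p.1 == w
      · simp [hp] at h; simp [pvM, ← h]
      · simp [hp] at h
        have := ih h
        simp [pvM] at this ⊢
        omega

-- B's while-loop: pop (w, d); skip if w is not a key; otherwise emit the dependent
-- list and, if d > 1, push the children at depth d-1.  The Lean stack keeps the top
-- at the head, so Python's "push reversed(children) onto an end-top stack" is exactly
-- prepending `children` in order here.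
def ddLoop (temp_dict : List (String × List String)) (stack : List (String × Int)) (result : List String) : List String :=
  match stack with
  | [] => result
  | (w, d) :: rest =>
    match h : PySem.Dict.get? ⟨temp_dict⟩ w with
    | none => ddLoop temp_dict rest result
    | some children =>
      if hd : 1 < d then
        ddLoop temp_dict ((children.map fun c => (c, d - 1)) ++ rest) (result ++ children)
      else
        ddLoop temp_dict rest (result ++ children)
termination_by (stack.map fun p => (pvM temp_dict + 1) ^ p.2.toNat).sum
decreasing_by
  · have : 0 < (pvM temp_dict + 1) ^ d.toNat := Nat.pow_pos (by omega)
    simp only [List.map_cons, List.sum_cons]; omega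
  · have hc : children.length ≤ pvM temp_dict := pvM_get? _ _ _ h
    have hpos : 0 < (pvM temp_dict + 1) ^ (d - 1).toNat := Nat.pow_pos (by omega)
    have ht : d.toNat = (d - 1).toNat + 1 := by omega
    simp only [List.map_cons, List.sum_cons, List.map_append, List.sum_append, List.map_map,
      Function.comp_def, List.map_const', List.sum_replicate, smul_eq_mul]
    have hlt : children.length * (pvM temp_dict + 1) ^ (d - 1).toNat < (pvM temp_dict + 1) ^ d.toNat := by
      calc children.length * (pvM temp_dict + 1) ^ (d - 1).toNat
          < (pvM temp_dict + 1) * (pvM temp_dict + 1) ^ (d - 1).toNat := by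
            exact Nat.mul_lt_mul_of_lt_of_le (by omega) le_rfl hpos
        _ = (pvM temp_dict + 1) ^ d.toNat := by rw [ht, pow_succ]; ring
    omega
  · have : 0 < (pvM temp_dict + 1) ^ d.toNat := Nat.pow_pos (by omega)
    simp only [List.map_cons, List.sum_cons]; omega

def direction_dependent_alt (temp_dict : List (String × List String)) (word : String) (n : Int) : List String :=
  ddLoop temp_dict [(word, n)] []

-- ===== PRECONDITION & SPEC =====
def Spec_direction_dependent (temp_dict : List (String × List String)) (word : String) (n : Int) (out : List String) : Prop := out = direction_dependent_alt temp_dict word n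
instance (temp_dict : List (String × List String)) (word : String) (n : Int) (out : List String) : Decidable (Spec_direction_dependent temp_dict word n out) := by unfold Spec_direction_dependent; infer_instance

-- ===== CLAIM (what is proved, stated in full; the proofs are below) =====
def Claim_equal_direction_dependent : Prop := ∀ (temp_dict : List (String × List String)) (word : String) (n : Int), Dom_direction_dependent temp_dict word n → Spec_direction_dependent temp_dict word n (direction_dependent temp_dict word n)

-- ===== LEMMAS AND PROOFS =====

theorem ddA_loop_eq (temp_dict : List (String × List String)) (m : Int) (ws : List String) :
    ∀ acc, ddA_loop temp_dict m ws acc = acc ++ ws.flatMap (fun w => direction_dependent temp_dict w m) := by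
  induction ws with
  | nil => intro acc; rw [ddA_loop.eq_def]; simp
  | cons w ws' ih => intro acc; rw [ddA_loop.eq_def]; simp only; rw [ih]; simp

theorem ddLoop_eq (temp_dict : List (String × List String)) (stack : List (String × Int)) (acc : List String) :
    ddLoop temp_dict stack acc = acc ++ stack.flatMap (fun p => direction_dependent temp_dict p.1 p.2) := by
  fun_induction ddLoop temp_dict stack acc with
  | case1 => simp
  | case2 acc w d rest h ih =>
      rw [ih]
      have : direction_dependent temp_dict w d = [] := by rw [direction_dependent.eq_def, h]
      simp [this]
  | case3 acc w d rest children h hd ih =>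
      rw [ih]
      have : direction_dependent temp_dict w d
          = children ++ children.flatMap (fun c => direction_dependent temp_dict c (d - 1)) := by
        rw [direction_dependent.eq_def, h]; simp only; rw [dif_pos hd, ddA_loop_eq]
      simp [this, List.flatMap_append, List.flatMap_map]
  | case4 acc w d rest children h hd ih =>
      rw [ih]
      have : direction_dependent temp_dict w d = children := by
        rw [direction_dependent.eq_def, h]; simp only; rw [dif_neg hd]
      simp [this]

-- ===== VERDICT (by name: the statement is the Claim_ definition above) =====
theorem direction_dependent_spec : Claim_equal_direction_dependent := by
  intro temp_dict word n _
  unfold Spec_direction_dependent direction_dependent_alt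
  rw [ddLoop_eq]
  simp
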